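-- pv_equiv track=rewrite | github.com/rfontanarosa/brainlordtools | brainlordtools/_equinox/decompress.py | snes_4bpp_to_pixels
-- ===== SOURCE A (Python) =====
-- def snes_4bpp_to_pixels(tile_data):
--     """Convert 32 bytes of SNES 4bpp tile to 8x8 pixel array (0-15)."""
--     pixels = []
--     for row in range(8):
--         bp01 = row * 2
--         bp23 = 16 + row * 2
--         bp0 = tile_data[bp01] if bp01 < len(tile_data) else 0
--         bp1 = tile_data[bp01 + 1] if bp01 + 1 < len(tile_data) else 0
--         bp2 = tile_data[bp23] if bp23 < len(tile_data) else 0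
--         bp3 = tile_data[bp23 + 1] if bp23 + 1 < len(tile_data) else 0
--         row_pixels = []
--         for bit in range(7, -1, -1):
--             p = 0
--             if bp0 & (1 << bit): p |= 1
--             if bp1 & (1 << bit): p |= 2
--             if bp2 & (1 << bit): p |= 4
--             if bp3 & (1 << bit): p |= 8
--             row_pixels.append(p)
--         pixels.append(row_pixels)
--     return pixels
-- ===== SOURCE B (Python) =====
-- def snes_4bpp_to_pixels(tile_data):
--     """Convert 32 bytes of SNES 4bpp tile to 8x8 pixel array (0-15)."""
--     data = (list(tile_data) + [0] * 32)[:32]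
--     pixels = []
--     for row in range(8):
--         o = row * 2
--         b0, b1, b2, b3 = data[o], data[o + 1], data[16 + o], data[17 + o]
--         rev = []
--         for _ in range(8):
--             b0, r0 = divmod(b0, 2)
--             b1, r1 = divmod(b1, 2)
--             b2, r2 = divmod(b2, 2)
--             b3, r3 = divmod(b3, 2)
--             rev.append(r0 + 2 * r1 + 4 * r2 + 8 * r3)
--         pixels.append(rev[::-1])
--     return pixels
-- ===== Notes on version B (the rewrite author's own statement) =====
-- stated objective: alternative
-- what changed: B zero-pads the tile to 32 bytes once instead of A's per-index bounds checks, and decodes each row by peeling bits LSB-first with eight divmod steps on the four plane bytes (summing weighted remainders, then reversing the row) instead of A's MSB-first mask-test-and-OR per pixel.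
import Mathlib
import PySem

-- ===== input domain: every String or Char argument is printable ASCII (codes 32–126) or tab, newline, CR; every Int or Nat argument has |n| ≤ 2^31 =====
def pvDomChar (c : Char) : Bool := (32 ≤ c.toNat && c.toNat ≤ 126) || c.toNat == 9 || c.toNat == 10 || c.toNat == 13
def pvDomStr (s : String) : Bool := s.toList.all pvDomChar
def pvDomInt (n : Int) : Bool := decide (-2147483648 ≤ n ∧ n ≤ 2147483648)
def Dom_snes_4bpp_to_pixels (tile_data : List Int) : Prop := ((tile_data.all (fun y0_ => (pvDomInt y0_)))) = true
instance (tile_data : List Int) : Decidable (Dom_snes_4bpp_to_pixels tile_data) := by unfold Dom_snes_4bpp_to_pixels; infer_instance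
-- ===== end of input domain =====

-- B replaces A's per-index bounds checks and MSB-first per-bit mask tests by zero-padding
-- the tile once and peeling bits LSB-first with divmod, building each row reversed.

-- ===== PORT A =====
-- Literal port of A: outer loop over rows 0..7, inner loop over bits 7..0,
-- each pixel built from all four bitplane bytes by guarded OR-ins.
def snes_4bpp_to_pixels (tile_data : List Int) : List (List Int) :=
  (PySem.List.pyRange 0 8 1).foldl (fun pixels row =>
    let bp01 : Int := row * 2
    let bp23 : Int := 16 + row * 2
    let bp0 : Int := if bp01 < (tile_data.length : Int) then PySem.List.pyGetD tile_data bp01 0 else 0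
    let bp1 : Int := if bp01 + 1 < (tile_data.length : Int) then PySem.List.pyGetD tile_data (bp01 + 1) 0 else 0
    let bp2 : Int := if bp23 < (tile_data.length : Int) then PySem.List.pyGetD tile_data bp23 0 else 0
    let bp3 : Int := if bp23 + 1 < (tile_data.length : Int) then PySem.List.pyGetD tile_data (bp23 + 1) 0 else 0
    let row_pixels : List Int := (PySem.List.pyRange 7 (-1) (-1)).foldl (fun row_pixels bit =>
      let p : Int := 0
      let p : Int := if PySem.Int.band bp0 (1 <<< bit.toNat) ≠ 0 then PySem.Int.bor p 1 else p
      let p : Int := if PySem.Int.band bp1 (1 <<< bit.toNat) ≠ 0 then PySem.Int.bor p 2 else p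
      let p : Int := if PySem.Int.band bp2 (1 <<< bit.toNat) ≠ 0 then PySem.Int.bor p 4 else p
      let p : Int := if PySem.Int.band bp3 (1 <<< bit.toNat) ≠ 0 then PySem.Int.bor p 8 else p
      row_pixels ++ [p]) []
    pixels ++ [row_pixels]) []

-- ===== PORT B =====
-- Literal port of B: zero-pad to 32 bytes once ((list + [0]*32)[:32]); per row fetch the
-- four plane bytes unguarded, then 8 divmod steps peel bits LSB-first into `rev`,
-- combining the four remainders with weights 1,2,4,8; the row is rev[::-1]
-- (ported as List.reverse, cf. PySem.List.slice?_none_none_neg_one).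
def snes_4bpp_to_pixels_alt (tile_data : List Int) : List (List Int) :=
  let data : List Int := PySem.List.slice (tile_data ++ List.replicate 32 0) none (some 32)
  (List.range 8).foldl (fun pixels (row : Nat) =>
    let o : Int := (row : Int) * 2
    let b0 : Int := PySem.List.pyGetD data o 0
    let b1 : Int := PySem.List.pyGetD data (o + 1) 0
    let b2 : Int := PySem.List.pyGetD data (16 + o) 0
    let b3 : Int := PySem.List.pyGetD data (17 + o) 0
    let res := (List.range 8).foldl (fun (s : Int × Int × Int × Int × List Int) _ =>
      let q0 : Int := PySem.Int.floordiv s.1 2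
      let r0 : Int := PySem.Int.mod s.1 2
      let q1 : Int := PySem.Int.floordiv s.2.1 2
      let r1 : Int := PySem.Int.mod s.2.1 2
      let q2 : Int := PySem.Int.floordiv s.2.2.1 2
      let r2 : Int := PySem.Int.mod s.2.2.1 2
      let q3 : Int := PySem.Int.floordiv s.2.2.2.1 2
      let r3 : Int := PySem.Int.mod s.2.2.2.1 2
      (q0, q1, q2, q3, s.2.2.2.2 ++ [r0 + 2 * r1 + 4 * r2 + 8 * r3])) (b0, b1, b2, b3, ([] : List Int))
    pixels ++ [res.2.2.2.2.reverse]) []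

-- ===== PRECONDITION & SPEC =====
def Spec_snes_4bpp_to_pixels (tile_data : List Int) (out : List (List Int)) : Prop := out = snes_4bpp_to_pixels_alt tile_data
instance (tile_data : List Int) (out : List (List Int)) : Decidable (Spec_snes_4bpp_to_pixels tile_data out) := by unfold Spec_snes_4bpp_to_pixels; infer_instance

-- ===== CLAIM (what is proved, stated in full; the proofs are below) =====
def Claim_equal_snes_4bpp_to_pixels : Prop := ∀ (tile_data : List Int), Dom_snes_4bpp_to_pixels tile_data → Spec_snes_4bpp_to_pixels tile_data (snes_4bpp_to_pixels tile_data)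

-- ===== LEMMAS AND PROOFS =====

theorem pvShiftPow (k : Nat) : ((1:Int) <<< k) = ((2^k : Nat) : Int) := by
  rw [Int.shiftLeft_eq]; push_cast; ring

-- Python's `a & (1 << k)`, read as bit k of a in infinite two's complement.
theorem pvBandPow2 (a : Int) (k : Nat) :
    (PySem.Int.band a ((1:Int) <<< k) = 0)
      ↔ (if 0 ≤ a then a.toNat.testBit k = false else (-a-1).toNat.testBit k = true) := by
  rw [pvShiftPow]
  have hp : (0:Int) ≤ ((2^k : Nat) : Int) := by positivity
  simp only [PySem.Int.band]
  by_cases ha : 0 ≤ a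
  · rw [if_pos ha, if_pos ha, if_pos hp]
    have ht : ((2^k : Nat) : Int).toNat = 2^k := by omega
    rw [ht, Nat.and_two_pow]
    rcases a.toNat.testBit k with _ | _ <;> simp
  · rw [if_neg ha, if_neg ha, if_pos hp]
    have ht : ((2^k : Nat) : Int).toNat = 2^k := by omega
    rw [ht, Nat.and_comm, Nat.and_two_pow]
    rcases (-a-1).toNat.testBit k with _ | _ <;> simp

-- Halving shifts the tested bit down by one, also for negative a.
theorem pvBandShift (a : Int) (k : Nat) :
    (PySem.Int.band (PySem.Int.floordiv a 2) ((1:Int) <<< k) = 0)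
      ↔ (PySem.Int.band a ((1:Int) <<< (k+1)) = 0) := by
  rw [pvBandPow2, pvBandPow2]
  have hd := PySem.Int.floordiv_mul_add_mod a 2
  have hr0 := PySem.Int.mod_nonneg a (show (0:Int) < 2 by norm_num)
  have hr1 := PySem.Int.mod_lt a (show (0:Int) < 2 by norm_num)
  by_cases ha : 0 ≤ a
  · have hq : 0 ≤ PySem.Int.floordiv a 2 := by omega
    rw [if_pos hq, if_pos ha]
    have he : (PySem.Int.floordiv a 2).toNat = a.toNat / 2 := by omega
    rw [he, ← Nat.testBit_add_one]
  · have hq : ¬ 0 ≤ PySem.Int.floordiv a 2 := by omega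
    rw [if_neg hq, if_neg ha]
    have he : (-(PySem.Int.floordiv a 2)-1).toNat = (-a-1).toNat / 2 := by omega
    rw [he, ← Nat.testBit_add_one]

-- k-fold floor-halving, matching B's divmod chain (outermost division applied last).
def pvFd (a : Int) : Nat → Int
  | 0 => a
  | k+1 => pvFd (PySem.Int.floordiv a 2) k

-- B's k-th remainder is 1 exactly when A's mask test for bit k fires.
theorem pvBitIter (a : Int) (k : Nat) :
    PySem.Int.mod (pvFd a k) 2 = if PySem.Int.band a ((1:Int) <<< k) ≠ 0 then 1 else 0 := by
  induction k generalizing a with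
  | zero =>
    have e : ((1:Int) <<< (0:Nat)) = 1 := rfl
    have h := PySem.Int.band_one a
    have h1 := PySem.Int.mod_nonneg a (show (0:Int) < 2 by norm_num)
    have h2 := PySem.Int.mod_lt a (show (0:Int) < 2 by norm_num)
    rw [pvFd, e, h]; split_ifs <;> omega
  | succ k ih =>
    rw [pvFd, ih]
    by_cases h : PySem.Int.band a ((1:Int) <<< (k+1)) = 0
    · rw [if_neg (by simpa using (pvBandShift a k).2 h), if_neg (by simpa using h)]
    · rw [if_pos (fun hc => h ((pvBandShift a k).1 hc)), if_pos h]

-- A's guarded fetch from the raw tile equals B's unguarded fetch from the zero-padded tile.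
theorem pvByteEq (td : List Int) (i : Int) (h0 : 0 ≤ i) (h32 : i < 32) :
    (if i < (td.length : Int) then PySem.List.pyGetD td i 0 else 0)
      = PySem.List.pyGetD (PySem.List.slice (td ++ List.replicate 32 0) none (some 32)) i 0 := by
  rw [PySem.List.slice_to _ (by norm_num : (0:Int) ≤ 32)]
  have hL : i < (((List.take (32:Int).toNat (td ++ List.replicate 32 0)).length : Nat) : Int) := by
    simp; omega
  conv_rhs => rw [PySem.List.pyGetD_eq_getElem _ _ h0 hL]
  by_cases hi : i < (td.length : Int)
  · rw [if_pos hi, PySem.List.pyGetD_eq_getElem _ _ h0 hi]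
    rw [List.getElem_take, List.getElem_append_left (by omega)]
  · rw [if_neg hi, List.getElem_take, List.getElem_append_right (by omega),
      List.getElem_replicate]

-- A's OR-accumulated pixel equals B's weighted sum of the four bit remainders.
theorem pvPixEq (a0 a1 a2 a3 : Int) (k : Nat)
    (m0 m1 m2 m3 : Int)
    (h0 : m0 = if PySem.Int.band a0 ((1:Int) <<< k) ≠ 0 then 1 else 0)
    (h1 : m1 = if PySem.Int.band a1 ((1:Int) <<< k) ≠ 0 then 1 else 0)
    (h2 : m2 = if PySem.Int.band a2 ((1:Int) <<< k) ≠ 0 then 1 else 0)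
    (h3 : m3 = if PySem.Int.band a3 ((1:Int) <<< k) ≠ 0 then 1 else 0) :
    (let p : Int := 0
     let p : Int := if PySem.Int.band a0 ((1:Int) <<< k) ≠ 0 then PySem.Int.bor p 1 else p
     let p : Int := if PySem.Int.band a1 ((1:Int) <<< k) ≠ 0 then PySem.Int.bor p 2 else p
     let p : Int := if PySem.Int.band a2 ((1:Int) <<< k) ≠ 0 then PySem.Int.bor p 4 else p
     let p : Int := if PySem.Int.band a3 ((1:Int) <<< k) ≠ 0 then PySem.Int.bor p 8 else p
     p) = m0 + 2 * m1 + 4 * m2 + 8 * m3 := by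
  subst h0 h1 h2 h3
  dsimp only
  split_ifs <;> decide

-- One row: A's MSB-first mask loop equals B's LSB-first divmod loop reversed.
theorem pvRowEq (a0 a1 a2 a3 : Int) :
    (PySem.List.pyRange 7 (-1) (-1)).foldl (fun row_pixels bit =>
      let p : Int := 0
      let p : Int := if PySem.Int.band a0 (1 <<< bit.toNat) ≠ 0 then PySem.Int.bor p 1 else p
      let p : Int := if PySem.Int.band a1 (1 <<< bit.toNat) ≠ 0 then PySem.Int.bor p 2 else p
      let p : Int := if PySem.Int.band a2 (1 <<< bit.toNat) ≠ 0 then PySem.Int.bor p 4 else p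
      let p : Int := if PySem.Int.band a3 (1 <<< bit.toNat) ≠ 0 then PySem.Int.bor p 8 else p
      row_pixels ++ [p]) []
    = ((List.range 8).foldl (fun (s : Int × Int × Int × Int × List Int) _ =>
        let q0 : Int := PySem.Int.floordiv s.1 2
        let r0 : Int := PySem.Int.mod s.1 2
        let q1 : Int := PySem.Int.floordiv s.2.1 2
        let r1 : Int := PySem.Int.mod s.2.1 2
        let q2 : Int := PySem.Int.floordiv s.2.2.1 2
        let r2 : Int := PySem.Int.mod s.2.2.1 2
        let q3 : Int := PySem.Int.floordiv s.2.2.2.1 2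
        let r3 : Int := PySem.Int.mod s.2.2.2.1 2
        (q0, q1, q2, q3, s.2.2.2.2 ++ [r0 + 2 * r1 + 4 * r2 + 8 * r3]))
        (a0, a1, a2, a3, ([] : List Int))).2.2.2.2.reverse := by
  have hr : PySem.List.pyRange 7 (-1) (-1) = [7,6,5,4,3,2,1,0] := by decide
  have hg : List.range 8 = [0,1,2,3,4,5,6,7] := by rfl
  rw [hr, hg]
  simp only [List.foldl_cons, List.foldl_nil]
  simp only [List.reverse_cons, List.reverse_nil, List.nil_append, List.cons_append,
    List.cons.injEq, and_true]
  refine ⟨?_, ?_, ?_, ?_, ?_, ?_, ?_, ?_⟩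
  · exact pvPixEq a0 a1 a2 a3 7 _ _ _ _ (pvBitIter a0 7) (pvBitIter a1 7) (pvBitIter a2 7) (pvBitIter a3 7)
  · exact pvPixEq a0 a1 a2 a3 6 _ _ _ _ (pvBitIter a0 6) (pvBitIter a1 6) (pvBitIter a2 6) (pvBitIter a3 6)
  · exact pvPixEq a0 a1 a2 a3 5 _ _ _ _ (pvBitIter a0 5) (pvBitIter a1 5) (pvBitIter a2 5) (pvBitIter a3 5)
  · exact pvPixEq a0 a1 a2 a3 4 _ _ _ _ (pvBitIter a0 4) (pvBitIter a1 4) (pvBitIter a2 4) (pvBitIter a3 4)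
  · exact pvPixEq a0 a1 a2 a3 3 _ _ _ _ (pvBitIter a0 3) (pvBitIter a1 3) (pvBitIter a2 3) (pvBitIter a3 3)
  · exact pvPixEq a0 a1 a2 a3 2 _ _ _ _ (pvBitIter a0 2) (pvBitIter a1 2) (pvBitIter a2 2) (pvBitIter a3 2)
  · exact pvPixEq a0 a1 a2 a3 1 _ _ _ _ (pvBitIter a0 1) (pvBitIter a1 1) (pvBitIter a2 1) (pvBitIter a3 1)
  · exact pvPixEq a0 a1 a2 a3 0 _ _ _ _ (pvBitIter a0 0) (pvBitIter a1 0) (pvBitIter a2 0) (pvBitIter a3 0)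

-- ===== VERDICT (by name: the statement is the Claim_ definition above) =====
-- One full row of A equals one full row of B (byte fetches included).
theorem pvFullRow (td : List Int) (r : Int) (rn : Nat) (hr : r = (rn : Int)) (h8 : rn < 8) :
    (let bp01 : Int := r * 2
     let bp23 : Int := 16 + r * 2
     let bp0 : Int := if bp01 < (td.length : Int) then PySem.List.pyGetD td bp01 0 else 0
     let bp1 : Int := if bp01 + 1 < (td.length : Int) then PySem.List.pyGetD td (bp01 + 1) 0 else 0
     let bp2 : Int := if bp23 < (td.length : Int) then PySem.List.pyGetD td bp23 0 else 0
     let bp3 : Int := if bp23 + 1 < (td.length : Int) then PySem.List.pyGetD td (bp23 + 1) 0 else 0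
     (PySem.List.pyRange 7 (-1) (-1)).foldl (fun row_pixels bit =>
       let p : Int := 0
       let p : Int := if PySem.Int.band bp0 (1 <<< bit.toNat) ≠ 0 then PySem.Int.bor p 1 else p
       let p : Int := if PySem.Int.band bp1 (1 <<< bit.toNat) ≠ 0 then PySem.Int.bor p 2 else p
       let p : Int := if PySem.Int.band bp2 (1 <<< bit.toNat) ≠ 0 then PySem.Int.bor p 4 else p
       let p : Int := if PySem.Int.band bp3 (1 <<< bit.toNat) ≠ 0 then PySem.Int.bor p 8 else p
       row_pixels ++ [p]) [])
    = (let data : List Int := PySem.List.slice (td ++ List.replicate 32 0) none (some 32)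
       let o : Int := (rn : Int) * 2
       let b0 : Int := PySem.List.pyGetD data o 0
       let b1 : Int := PySem.List.pyGetD data (o + 1) 0
       let b2 : Int := PySem.List.pyGetD data (16 + o) 0
       let b3 : Int := PySem.List.pyGetD data (17 + o) 0
       ((List.range 8).foldl (fun (s : Int × Int × Int × Int × List Int) _ =>
         let q0 : Int := PySem.Int.floordiv s.1 2
         let r0 : Int := PySem.Int.mod s.1 2
         let q1 : Int := PySem.Int.floordiv s.2.1 2
         let r1 : Int := PySem.Int.mod s.2.1 2
         let q2 : Int := PySem.Int.floordiv s.2.2.1 2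
         let r2 : Int := PySem.Int.mod s.2.2.1 2
         let q3 : Int := PySem.Int.floordiv s.2.2.2.1 2
         let r3 : Int := PySem.Int.mod s.2.2.2.1 2
         (q0, q1, q2, q3, s.2.2.2.2 ++ [r0 + 2 * r1 + 4 * r2 + 8 * r3]))
         (b0, b1, b2, b3, ([] : List Int))).2.2.2.2.reverse) := by
  subst hr
  dsimp only
  rw [show (16:Int) + (rn:Int) * 2 + 1 = 17 + (rn:Int) * 2 from by ring,
    pvByteEq td ((rn:Int) * 2) (by omega) (by omega),
    pvByteEq td ((rn:Int) * 2 + 1) (by omega) (by omega),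
    pvByteEq td (16 + (rn:Int) * 2) (by omega) (by omega),
    pvByteEq td (17 + (rn:Int) * 2) (by omega) (by omega)]
  exact pvRowEq _ _ _ _

-- ===== VERDICT (by name: the statement is the Claim_ definition above) =====
set_option maxHeartbeats 1000000 in
theorem snes_4bpp_to_pixels_spec : Claim_equal_snes_4bpp_to_pixels := by
  intro td _
  unfold Spec_snes_4bpp_to_pixels snes_4bpp_to_pixels snes_4bpp_to_pixels_alt
  simp only [PySem.List.foldl_append_singleton_eq_map]
  rw [show PySem.List.pyRange 0 8 1 = [0,1,2,3,4,5,6,7] from by decide]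
  rw [show List.range 8 = [0,1,2,3,4,5,6,7] from rfl]
  simp only [List.map_cons, List.map_nil, List.nil_append, List.cons.injEq, and_true]
  refine ⟨?_, ?_, ?_, ?_, ?_, ?_, ?_, ?_⟩
  · exact pvFullRow td 0 0 (by norm_num) (by norm_num)
  · exact pvFullRow td 1 1 (by norm_num) (by norm_num)
  · exact pvFullRow td 2 2 (by norm_num) (by norm_num)
  · exact pvFullRow td 3 3 (by norm_num) (by norm_num)
  · exact pvFullRow td 4 4 (by norm_num) (by norm_num)
  · exact pvFullRow td 5 5 (by norm_num) (by norm_num)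
  · exact pvFullRow td 6 6 (by norm_num) (by norm_num)
  · exact pvFullRow td 7 7 (by norm_num) (by norm_num)
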